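-- pv_equiv track=rewrite | github.com/FirebirdSolutions/Guardian | src/pattern_detector.py | _determine_risk_level
-- ===== SOURCE A (Python) =====
-- from typing import Dict, List, Tuple, Optional
--
-- def _determine_risk_level(detected_patterns: List[Dict]) -> str:
--     """Determine overall risk level from detected patterns.
--
--     Risk levels:
--     - CRITICAL: Immediate danger, requires emergency response
--     - HIGH: Significant risk, requires crisis intervention
--     - MEDIUM: Moderate concern, offer resources
--     - LOW: No immediate risk
--     """
--     if not detected_patterns:
--         return "LOW"
--
--     # Check highest severity
--     severities = [p.get("severity", "LOW") for p in detected_patterns]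
--
--     if "CRITICAL" in severities:
--         return "CRITICAL"
--     elif "HIGH" in severities:
--         return "HIGH"
--     elif "MEDIUM" in severities:
--         return "MEDIUM"
--     else:
--         return "LOW"
-- ===== SOURCE B (Python) =====
-- from typing import Dict, List
--
-- _RANK = {"LOW": 0, "MEDIUM": 1, "HIGH": 2, "CRITICAL": 3}
-- _LEVELS = ["LOW", "MEDIUM", "HIGH", "CRITICAL"]
--
-- def _determine_risk_level(detected_patterns: List[Dict]) -> str:
--     worst = 0
--     for p in detected_patterns:
--         worst = max(worst, _RANK.get(p.get("severity", "LOW"), 0))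
--     return _LEVELS[worst]
-- ===== Notes on version B (the rewrite author's own statement) =====
-- stated objective: simpler
-- what changed: Replaces building a severities list plus three separate membership scans with a single pass keeping a running maximum severity rank, mapped back to its level name at the end.
import Mathlib
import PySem

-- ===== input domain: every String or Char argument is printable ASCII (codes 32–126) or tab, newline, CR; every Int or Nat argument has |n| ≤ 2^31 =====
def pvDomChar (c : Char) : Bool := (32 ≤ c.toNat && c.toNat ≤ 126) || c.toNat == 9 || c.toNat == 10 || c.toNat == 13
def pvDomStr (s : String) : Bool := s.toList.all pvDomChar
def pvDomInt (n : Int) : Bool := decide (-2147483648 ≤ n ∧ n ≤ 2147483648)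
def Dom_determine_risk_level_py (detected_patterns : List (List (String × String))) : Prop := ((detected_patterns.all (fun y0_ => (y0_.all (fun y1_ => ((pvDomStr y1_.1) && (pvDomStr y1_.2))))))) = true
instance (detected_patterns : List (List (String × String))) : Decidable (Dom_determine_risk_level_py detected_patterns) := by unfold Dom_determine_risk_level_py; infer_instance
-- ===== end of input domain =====

-- B is a single pass keeping the running maximum severity rank instead of a severities list plus three membership scans (objective: simpler).

-- shared helper: p.get("severity", "LOW") — both Pythons make exactly this call
def pvSev (p : List (String × String)) : String := (PySem.Dict.mk p).getD "severity" "LOW"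

-- ===== PORT A =====
def determine_risk_level_py (detected_patterns : List (List (String × String))) : String :=
  if detected_patterns = [] then "LOW"
  else
    let severities := detected_patterns.map pvSev
    if severities.contains "CRITICAL" then "CRITICAL"
    else if severities.contains "HIGH" then "HIGH"
    else if severities.contains "MEDIUM" then "MEDIUM"
    else "LOW"

-- ===== PORT B =====
-- _RANK.get(s, 0)
def pvRank (s : String) : Nat :=
  (PySem.Dict.mk [("LOW", 0), ("MEDIUM", 1), ("HIGH", 2), ("CRITICAL", 3)]).getD s 0

def pvLevels : List String := ["LOW", "MEDIUM", "HIGH", "CRITICAL"]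

def determine_risk_level_py_alt (detected_patterns : List (List (String × String))) : String :=
  let worst := detected_patterns.foldl (fun w p => max w (pvRank (pvSev p))) 0
  pvLevels[worst]!

-- ===== PRECONDITION & SPEC =====
def Spec_determine_risk_level_py (detected_patterns : List (List (String × String))) (out : String) : Prop := out = determine_risk_level_py_alt detected_patterns
instance (detected_patterns : List (List (String × String))) (out : String) : Decidable (Spec_determine_risk_level_py detected_patterns out) := by unfold Spec_determine_risk_level_py; infer_instance

-- ===== CLAIM (what is proved, stated in full; the proofs are below) =====
def Claim_equal_determine_risk_level_py : Prop := ∀ (detected_patterns : List (List (String × String))), Dom_determine_risk_level_py detected_patterns → Spec_determine_risk_level_py detected_patterns (determine_risk_level_py detected_patterns)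

-- ===== LEMMAS AND PROOFS =====

def pvMf (ss : List String) : Nat := ss.foldr (fun s a => max (pvRank s) a) 0

theorem pvMf_cons (s : String) (t : List String) :
    pvMf (s :: t) = max (pvRank s) (pvMf t) := rfl

theorem pvRank_cases (s : String) : pvRank s =
    (if "LOW" = s then 0 else if "MEDIUM" = s then 1 else if "HIGH" = s then 2
     else if "CRITICAL" = s then 3 else 0) := by
  simp only [pvRank, PySem.Dict.getD_eq_get?_getD, PySem.Dict.get?_mk_cons, beq_iff_eq]
  split_ifs <;> rfl

theorem pvRank_le (s : String) : pvRank s ≤ 3 := by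
  rw [pvRank_cases]; split_ifs <;> omega

theorem pvMf_le (ss : List String) : pvMf ss ≤ 3 := by
  induction ss with
  | nil => simp [pvMf]
  | cons s t ih =>
      have := pvRank_le s
      rw [pvMf_cons]
      omega

theorem pvRank_eq3 (s : String) : pvRank s = 3 ↔ "CRITICAL" = s := by
  rw [pvRank_cases]; split_ifs with h1 h2 h3 h4
  · subst h1; decide
  · subst h2; decide
  · subst h3; decide
  · subst h4; decide
  · simp [h4]

theorem pvRank_ge2 (s : String) : 2 ≤ pvRank s ↔ ("CRITICAL" = s ∨ "HIGH" = s) := by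
  rw [pvRank_cases]; split_ifs with h1 h2 h3 h4
  · subst h1; decide
  · subst h2; decide
  · subst h3; decide
  · subst h4; decide
  · simp [h3, h4]

theorem pvRank_ge1 (s : String) :
    1 ≤ pvRank s ↔ ("CRITICAL" = s ∨ "HIGH" = s ∨ "MEDIUM" = s) := by
  rw [pvRank_cases]; split_ifs with h1 h2 h3 h4
  · subst h1; decide
  · subst h2; decide
  · subst h3; decide
  · subst h4; decide
  · simp [h2, h3, h4]

theorem pvMf_chars (ss : List String) :
    (ss.contains "CRITICAL" = true ↔ pvMf ss = 3) ∧
    ((ss.contains "CRITICAL" = true ∨ ss.contains "HIGH" = true) ↔ 2 ≤ pvMf ss) ∧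
    ((ss.contains "CRITICAL" = true ∨ ss.contains "HIGH" = true ∨ ss.contains "MEDIUM" = true)
      ↔ 1 ≤ pvMf ss) := by
  induction ss with
  | nil => simp [pvMf]
  | cons s t ih =>
      have hr := pvRank_le s
      have hm := pvMf_le t
      have e3 : max (pvRank s) (pvMf t) = 3 ↔ (pvRank s = 3 ∨ pvMf t = 3) := by omega
      have e2 : 2 ≤ max (pvRank s) (pvMf t) ↔ (2 ≤ pvRank s ∨ 2 ≤ pvMf t) := by omega
      have e1 : 1 ≤ max (pvRank s) (pvMf t) ↔ (1 ≤ pvRank s ∨ 1 ≤ pvMf t) := by omega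
      obtain ⟨ih1, ih2, ih3⟩ := ih
      refine ⟨?_, ?_, ?_⟩ <;>
        simp only [pvMf_cons, List.contains_cons, Bool.or_eq_true, beq_iff_eq]
      · constructor
        · rintro (h | h)
          · have := (pvRank_eq3 s).mpr h; omega
          · have := ih1.mp h; omega
        · intro h
          have : pvRank s = 3 ∨ pvMf t = 3 := by omega
          rcases this with h' | h'
          · exact Or.inl ((pvRank_eq3 s).mp h')
          · exact Or.inr (ih1.mpr h')
      · constructor
        · rintro ((h | h) | (h | h))
          · have := (pvRank_ge2 s).mpr (Or.inl h); omega
          · have := ih2.mp (Or.inl h); omega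
          · have := (pvRank_ge2 s).mpr (Or.inr h); omega
          · have := ih2.mp (Or.inr h); omega
        · intro h
          have : 2 ≤ pvRank s ∨ 2 ≤ pvMf t := by omega
          rcases this with h' | h'
          · rcases (pvRank_ge2 s).mp h' with h'' | h''
            · exact Or.inl (Or.inl h'')
            · exact Or.inr (Or.inl h'')
          · rcases ih2.mpr h' with h'' | h''
            · exact Or.inl (Or.inr h'')
            · exact Or.inr (Or.inr h'')
      · constructor
        · rintro ((h | h) | (h | h) | (h | h))
          · have := (pvRank_ge1 s).mpr (Or.inl h); omega
          · have := ih3.mp (Or.inl h); omega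
          · have := (pvRank_ge1 s).mpr (Or.inr (Or.inl h)); omega
          · have := ih3.mp (Or.inr (Or.inl h)); omega
          · have := (pvRank_ge1 s).mpr (Or.inr (Or.inr h)); omega
          · have := ih3.mp (Or.inr (Or.inr h)); omega
        · intro h
          have : 1 ≤ pvRank s ∨ 1 ≤ pvMf t := by omega
          rcases this with h' | h'
          · rcases (pvRank_ge1 s).mp h' with h'' | h'' | h''
            · exact Or.inl (Or.inl h'')
            · exact Or.inr (Or.inl (Or.inl h''))
            · exact Or.inr (Or.inr (Or.inl h''))
          · rcases ih3.mpr h' with h'' | h'' | h''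
            · exact Or.inl (Or.inr h'')
            · exact Or.inr (Or.inl (Or.inr h''))
            · exact Or.inr (Or.inr (Or.inr h''))

theorem pvFoldl_eq_mf (ss : List String) (acc : Nat) :
    ss.foldl (fun w s => max w (pvRank s)) acc = max acc (pvMf ss) := by
  induction ss generalizing acc with
  | nil => simp [pvMf]
  | cons s t ih =>
      simp only [List.foldl_cons, ih, pvMf_cons]
      omega

theorem pvMain (ss : List String) :
    (if ss.contains "CRITICAL" then "CRITICAL"
     else if ss.contains "HIGH" then "HIGH"
     else if ss.contains "MEDIUM" then "MEDIUM"
     else "LOW") = pvLevels[pvMf ss]! := by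
  have hb := pvMf_le ss
  obtain ⟨hc, h2, h1⟩ := pvMf_chars ss
  have hCof : pvMf ss ≠ 3 → ss.contains "CRITICAL" = false := by
    intro hn
    cases hcb : ss.contains "CRITICAL" with
    | false => rfl
    | true => exact absurd (hc.mp hcb) hn
  have hHof : pvMf ss < 2 → ss.contains "HIGH" = false := by
    intro hn
    cases hhb : ss.contains "HIGH" with
    | false => rfl
    | true => exact absurd (h2.mp (Or.inr hhb)) (by omega)
  have hMof : pvMf ss < 1 → ss.contains "MEDIUM" = false := by
    intro hn
    cases hmb : ss.contains "MEDIUM" with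
    | false => rfl
    | true => exact absurd (h1.mp (Or.inr (Or.inr hmb))) (by omega)
  set m := pvMf ss with hm
  interval_cases m
  · rw [hCof (by omega), hHof (by omega), hMof (by omega)]
    simp [pvLevels]
  · have hC := hCof (by omega)
    have hH := hHof (by omega)
    have hM : ss.contains "MEDIUM" = true := by
      rcases h1.mpr (by omega) with h | h | h
      · rw [hC] at h; cases h
      · rw [hH] at h; cases h
      · exact h
    rw [hC, hH, hM]
    simp [pvLevels]
  · have hC := hCof (by omega)
    have hH : ss.contains "HIGH" = true := by
      rcases h2.mpr (by omega) with h | h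
      · rw [hC] at h; cases h
      · exact h
    rw [hC, hH]
    simp [pvLevels]
  · have hC : ss.contains "CRITICAL" = true := hc.mpr (by omega)
    rw [hC]
    simp [pvLevels]

-- ===== VERDICT (by name: the statement is the Claim_ definition above) =====
theorem determine_risk_level_py_spec : Claim_equal_determine_risk_level_py := by
  intro dp _
  unfold Spec_determine_risk_level_py determine_risk_level_py determine_risk_level_py_alt
  have hfold : dp.foldl (fun w p => max w (pvRank (pvSev p))) 0
      = pvMf (dp.map pvSev) := by
    rw [← List.foldl_map (f := pvSev) (g := fun w s => max w (pvRank s)),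
      pvFoldl_eq_mf]
    omega
  simp only [hfold]
  by_cases h : dp = []
  · subst h; simp [pvMf, pvLevels]
  · simp only [if_neg h]
    exact pvMain (dp.map pvSev)
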